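-- pv_equiv track=rewrite | github.com/ReliableSecurity/cloud-security-broker | dlp/data_protection.py | _get_compliance_requirements
-- ===== SOURCE A (Python) =====
-- from typing import Dict, List, Optional, Any, Tuple
--
-- def _get_compliance_requirements(data_types: List[str]) -> List[str]:
--     """Определение требований соответствия"""
--     requirements = set()
--
--     for data_type in data_types:
--         if data_type in ['EMAIL', 'NAME', 'ADDRESS']:
--             requirements.add('GDPR')
--         if data_type in ['SSN', 'MEDICAL']:
--             requirements.add('HIPAA')
--         if data_type in ['CREDIT_CARD', 'CVV']:
--             requirements.add('PCI_DSS')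
--
--     return list(requirements)
-- ===== SOURCE B (Python) =====
-- # B: table-driven — iterate over requirement categories testing set intersection
-- # against the input converted to a set once, instead of scanning each data type.
-- _TRIGGERS = [
--     ("GDPR", {"EMAIL", "NAME", "ADDRESS"}),
--     ("HIPAA", {"SSN", "MEDICAL"}),
--     ("PCI_DSS", {"CREDIT_CARD", "CVV"}),
-- ]
--
-- def _get_compliance_requirements(data_types):
--     present = set(data_types)
--     return [req for req, triggers in _TRIGGERS if triggers & present]
-- ===== Notes on version B (the rewrite author's own statement) =====
-- stated objective: alternative
-- what changed: B inverts the loop nesting: instead of scanning each data type against three hard-coded trigger lists, it converts the input to a set once and iterates over a requirement->trigger-set table, emitting a requirement when its trigger set intersects the input set (output compared as a set, since A's list(set) order is hash-dependent).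
import Mathlib
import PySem

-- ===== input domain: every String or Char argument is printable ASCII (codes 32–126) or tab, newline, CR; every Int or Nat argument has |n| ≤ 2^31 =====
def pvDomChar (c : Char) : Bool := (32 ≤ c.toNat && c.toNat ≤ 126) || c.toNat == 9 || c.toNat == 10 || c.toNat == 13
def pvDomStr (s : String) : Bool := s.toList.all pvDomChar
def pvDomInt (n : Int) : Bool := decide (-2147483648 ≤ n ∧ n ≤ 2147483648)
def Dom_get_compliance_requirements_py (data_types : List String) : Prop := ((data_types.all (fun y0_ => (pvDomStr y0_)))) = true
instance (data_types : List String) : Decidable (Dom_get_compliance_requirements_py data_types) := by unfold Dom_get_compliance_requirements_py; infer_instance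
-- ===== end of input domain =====

-- ===== PORT A =====
-- B replaces A's per-element scan by a requirement→trigger-set table intersected
-- with the input-as-set (objective: alternative decomposition). Python's list(set)
-- iteration order is hash-dependent and unspecified, so both ports linearize the
-- result set in the fixed order GDPR, HIPAA, PCI_DSS (outputs are compared as sets).

-- one iteration of A's for-loop: the three membership tests, in order
def pvAStep (s : PySem.Set String) (dt : String) : PySem.Set String :=
  let s1 := if dt ∈ (["EMAIL", "NAME", "ADDRESS"] : List String) then PySem.Set.add s "GDPR" else s
  let s2 := if dt ∈ (["SSN", "MEDICAL"] : List String) then PySem.Set.add s1 "HIPAA" else s1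
  if dt ∈ (["CREDIT_CARD", "CVV"] : List String) then PySem.Set.add s2 "PCI_DSS" else s2

def get_compliance_requirements_py (data_types : List String) : List String :=
  let requirements : PySem.Set String := data_types.foldl pvAStep PySem.Set.empty
  -- list(requirements): order unspecified in Python; fixed canonical linearization
  (["GDPR", "HIPAA", "PCI_DSS"] : List String).filter (fun r => PySem.Set.contains requirements r)

-- ===== PORT B =====
def pvTriggers : List (String × PySem.Set String) :=
  [("GDPR", ["EMAIL", "NAME", "ADDRESS"]),
   ("HIPAA", ["SSN", "MEDICAL"]),
   ("PCI_DSS", ["CREDIT_CARD", "CVV"])]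

def get_compliance_requirements_py_alt (data_types : List String) : List String :=
  let present : PySem.Set String := PySem.Set.ofList data_types
  (pvTriggers.filter (fun p => !(PySem.Set.inter p.2 present).isEmpty)).map Prod.fst

-- ===== PRECONDITION & SPEC =====
def Spec_get_compliance_requirements_py (data_types : List String) (out : List String) : Prop := out = get_compliance_requirements_py_alt data_types
instance (data_types : List String) (out : List String) : Decidable (Spec_get_compliance_requirements_py data_types out) := by unfold Spec_get_compliance_requirements_py; infer_instance

-- ===== CLAIM (what is proved, stated in full; the proofs are below) =====
def Claim_equal_get_compliance_requirements_py : Prop := ∀ (data_types : List String), Dom_get_compliance_requirements_py data_types → Spec_get_compliance_requirements_py data_types (get_compliance_requirements_py data_types)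

-- ===== LEMMAS AND PROOFS =====

-- which requirement a data type triggers (proof-side characterisation)
def pvTrig (r : String) (dt : String) : Bool :=
  (r == "GDPR" && (["EMAIL", "NAME", "ADDRESS"] : List String).contains dt) ||
  (r == "HIPAA" && (["SSN", "MEDICAL"] : List String).contains dt) ||
  (r == "PCI_DSS" && (["CREDIT_CARD", "CVV"] : List String).contains dt)

theorem pv_contains_step (s : PySem.Set String) (dt r : String) :
    PySem.Set.contains (pvAStep s dt) r = (PySem.Set.contains s r || pvTrig r dt) := by
  unfold pvAStep pvTrig
  split_ifs with h1 h2 h3 <;>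
    rw [Bool.eq_iff_iff] <;>
    simp_all [List.contains_eq_mem, beq_iff_eq] <;>
    tauto

theorem pv_contains_foldl (dts : List String) (s : PySem.Set String) (r : String) :
    PySem.Set.contains (dts.foldl pvAStep s) r
      = (PySem.Set.contains s r || dts.any (fun dt => pvTrig r dt)) := by
  induction dts generalizing s with
  | nil => simp
  | cons d ds ih =>
      rw [List.foldl_cons, ih, pv_contains_step, List.any_cons, Bool.or_assoc]

theorem pv_inter_nonempty (t : List String) (xs : List String) :
    (!(PySem.Set.inter t (PySem.Set.ofList xs)).isEmpty)
      = t.any (fun x => x ∈ xs) := by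
  rw [Bool.eq_iff_iff]
  simp [PySem.Set.inter, List.any_eq_true,
        PySem.Set.contains, List.contains_eq_mem, PySem.Set.mem_ofList]

theorem pv_any_eq (xs : List String) (c : String) :
    (xs.any fun dt => decide (dt = c)) = decide (c ∈ xs) := by
  rw [Bool.eq_iff_iff]
  simp only [List.any_eq_true, decide_eq_true_eq]
  exact ⟨fun ⟨x, hx, e⟩ => e ▸ hx, fun h => ⟨c, h, rfl⟩⟩

theorem pv_any_or (xs : List String) (p q : String → Bool) :
    (xs.any fun x => p x || q x) = (xs.any p || xs.any q) := by
  induction xs with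
  | nil => rfl
  | cons a l ih =>
      simp only [List.any_cons, ih]
      cases p a <;> cases q a <;> simp

-- ===== VERDICT (by name: the statement is the Claim_ definition above) =====
theorem get_compliance_requirements_py_spec : Claim_equal_get_compliance_requirements_py := by
  intro data_types _
  unfold Spec_get_compliance_requirements_py
  unfold get_compliance_requirements_py get_compliance_requirements_py_alt pvTriggers
  simp only [List.filter, pv_inter_nonempty, pv_contains_foldl]
  simp [PySem.Set.empty, PySem.Set.contains, pvTrig, pv_any_or, pv_any_eq,
        List.contains_eq_mem]
  cases decide ("EMAIL" ∈ data_types) || (decide ("NAME" ∈ data_types) || decide ("ADDRESS" ∈ data_types)) <;>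
    cases decide ("SSN" ∈ data_types) || decide ("MEDICAL" ∈ data_types) <;>
      cases decide ("CREDIT_CARD" ∈ data_types) || decide ("CVV" ∈ data_types) <;> rfl
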